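-- pv_equiv track=rewrite | github.com/crdndorian-dev/prediction-market-pricing-analysis | src/scripts/03-auto-calibrate-logit-model-v1.1.py | _build_feat_label
-- ===== SOURCE A (Python) =====
-- from typing import Any, Dict, Iterable, List, Optional, Tuple
--
-- def _format_feat_token(prefix: str, feats: List[str]) -> Optional[str]:
--     if not feats:
--         return None
--     return f"{prefix}:{'+'.join(feats)}"
--
-- def _build_feat_label(option_feats: List[str], pm_feats: List[str], base_features: List[str]) -> str:
--     optional = [f for f in option_feats if f not in base_features]
--     if not optional and not pm_feats:
--         return "min"
--
--     tokens: List[str] = []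
--     # infer groups from feature names
--     vol = [f for f in optional if f in {"rv20", "rv20_sqrtT"}]
--     mon = [f for f in optional if f in {"log_m_fwd", "abs_log_m_fwd"}]
--     interactions = [f for f in optional if f in {"x_m", "x_abs_m"}]
--     other = [f for f in optional if f not in set(vol + mon + interactions)]
--
--     for prefix, feats in [
--         ("v", vol),
--         ("m", mon),
--         ("x", interactions),
--     ]:
--         token = _format_feat_token(prefix, feats)
--         if token:
--             tokens.append(token)
--     if other:
--         tokens.append("o:" + "+".join(other))
--     if pm_feats:
--         tokens.append("pm:" + "+".join(pm_feats))
--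
--     return "+".join(tokens) if tokens else "min"
-- ===== SOURCE B (Python) =====
-- _GROUP_OF = {"rv20": "v", "rv20_sqrtT": "v",
--              "log_m_fwd": "m", "abs_log_m_fwd": "m",
--              "x_m": "x", "x_abs_m": "x"}
--
-- def _build_feat_label(option_feats, pm_feats, base_features):
--     base = set(base_features)
--     groups = {"v": [], "m": [], "x": [], "o": []}
--     any_optional = False
--     for f in option_feats:
--         if f not in base:
--             any_optional = True
--             groups[_GROUP_OF.get(f, "o")].append(f)
--     if not any_optional and not pm_feats:
--         return "min"
--     tokens = [p + ":" + "+".join(groups[p]) for p in ["v", "m", "x", "o"] if groups[p]]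
--     if pm_feats:
--         tokens.append("pm:" + "+".join(pm_feats))
--     return "+".join(tokens)
-- ===== Notes on version B (the rewrite author's own statement) =====
-- stated objective: faster
-- what changed: Replaces the four separate filtering passes over `optional` (plus the list-membership rescans for `base_features` and for `other`) with one classifying pass that dispatches each non-base feature into a per-group bucket via a fixed name->group dict and a base set, then emits tokens by walking the fixed group order.
import Mathlib
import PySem

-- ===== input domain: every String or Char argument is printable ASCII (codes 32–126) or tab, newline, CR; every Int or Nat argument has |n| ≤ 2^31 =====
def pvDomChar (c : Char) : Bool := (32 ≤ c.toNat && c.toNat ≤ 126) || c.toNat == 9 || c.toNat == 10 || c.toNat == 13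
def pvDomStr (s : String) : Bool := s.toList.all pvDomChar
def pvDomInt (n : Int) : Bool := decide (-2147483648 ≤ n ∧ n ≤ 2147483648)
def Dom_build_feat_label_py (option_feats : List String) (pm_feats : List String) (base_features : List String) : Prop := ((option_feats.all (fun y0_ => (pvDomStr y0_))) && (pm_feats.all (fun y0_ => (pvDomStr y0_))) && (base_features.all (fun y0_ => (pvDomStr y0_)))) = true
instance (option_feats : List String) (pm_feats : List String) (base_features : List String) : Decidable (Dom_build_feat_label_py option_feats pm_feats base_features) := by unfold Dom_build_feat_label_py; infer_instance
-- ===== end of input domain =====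

-- B builds the four groups in ONE classifying pass via a fixed name->group map instead of A's four filtering passes; same return value.

-- ===== PORT A =====
def format_feat_token (pfx : String) (feats : List String) : Option String :=
  if feats = [] then none
  else some (pfx ++ ":" ++ PySem.Str.join "+" feats)

-- the body of A's token-accumulating for-loop
def pvStepA (toks : List String) (pf : String × List String) : List String :=
  match format_feat_token pf.1 pf.2 with
  | none => toks
  | some t => if t = "" then toks else toks ++ [t]

def build_feat_label_py (option_feats : List String) (pm_feats : List String) (base_features : List String) : String :=
  let optional := option_feats.filter (fun f => !(base_features.contains f))
  if optional = [] ∧ pm_feats = [] then "min"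
  else
    let vol := optional.filter (fun f => f == "rv20" || f == "rv20_sqrtT")
    let mon := optional.filter (fun f => f == "log_m_fwd" || f == "abs_log_m_fwd")
    let interactions := optional.filter (fun f => f == "x_m" || f == "x_abs_m")
    let other := optional.filter (fun f => !((PySem.Set.ofList (vol ++ mon ++ interactions)).contains f))
    let tokens : List String :=
      [("v", vol), ("m", mon), ("x", interactions)].foldl pvStepA []
    let tokens := if other = [] then tokens else tokens ++ ["o:" ++ PySem.Str.join "+" other]
    let tokens := if pm_feats = [] then tokens else tokens ++ ["pm:" ++ PySem.Str.join "+" pm_feats]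
    if tokens = [] then "min" else PySem.Str.join "+" tokens

-- ===== PORT B =====
-- the fixed name -> group mapping (_GROUP_OF in Source B)
def pvGroupOf : PySem.Dict String String :=
  PySem.Dict.ofList [("rv20", "v"), ("rv20_sqrtT", "v"),
                     ("log_m_fwd", "m"), ("abs_log_m_fwd", "m"),
                     ("x_m", "x"), ("x_abs_m", "x")]

-- the `groups` dict of Source B has the fixed keys "v","m","x","o": represented as a record
structure PvGroups where
  v : List String
  m : List String
  x : List String
  o : List String
deriving DecidableEq, Repr

def pvGroupsGet (g : PvGroups) (p : String) : List String :=
  if p = "v" then g.v else if p = "m" then g.m else if p = "x" then g.x else g.o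

def pvGroupsAppend (g : PvGroups) (p : String) (f : String) : PvGroups :=
  if p = "v" then { g with v := g.v ++ [f] }
  else if p = "m" then { g with m := g.m ++ [f] }
  else if p = "x" then { g with x := g.x ++ [f] }
  else { g with o := g.o ++ [f] }

def build_feat_label_py_alt (option_feats : List String) (pm_feats : List String) (base_features : List String) : String :=
  let base := PySem.Set.ofList base_features
  let st := option_feats.foldl
    (fun (st : PvGroups × Bool) f =>
      if !(PySem.Set.contains base f) then
        (pvGroupsAppend st.1 (pvGroupOf.getD f "o") f, true)
      else st)
    (⟨[], [], [], []⟩, false)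
  if st.2 = false ∧ pm_feats = [] then "min"
  else
    let tokens :=
      (["v", "m", "x", "o"].filter (fun p => pvGroupsGet st.1 p ≠ [])).map
        (fun p => p ++ ":" ++ PySem.Str.join "+" (pvGroupsGet st.1 p))
    let tokens := if pm_feats = [] then tokens else tokens ++ ["pm:" ++ PySem.Str.join "+" pm_feats]
    PySem.Str.join "+" tokens

-- ===== PRECONDITION & SPEC =====
def Spec_build_feat_label_py (option_feats : List String) (pm_feats : List String) (base_features : List String) (out : String) : Prop := out = build_feat_label_py_alt option_feats pm_feats base_features
instance (option_feats : List String) (pm_feats : List String) (base_features : List String) (out : String) : Decidable (Spec_build_feat_label_py option_feats pm_feats base_features out) := by unfold Spec_build_feat_label_py; infer_instance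

-- ===== CLAIM (what is proved, stated in full; the proofs are below) =====
def Claim_equal_build_feat_label_py : Prop := ∀ (option_feats : List String) (pm_feats : List String) (base_features : List String), Dom_build_feat_label_py option_feats pm_feats base_features → Spec_build_feat_label_py option_feats pm_feats base_features (build_feat_label_py option_feats pm_feats base_features)

-- ===== LEMMAS AND PROOFS =====

def pvIsV (f : String) : Bool := f == "rv20" || f == "rv20_sqrtT"
def pvIsM (f : String) : Bool := f == "log_m_fwd" || f == "abs_log_m_fwd"
def pvIsX (f : String) : Bool := f == "x_m" || f == "x_abs_m"
def pvIsO (f : String) : Bool := !(pvIsV f || pvIsM f || pvIsX f)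

lemma classify_eq (f : String) :
    pvGroupOf.getD f "o" =
      (if pvIsV f then "v" else if pvIsM f then "m" else if pvIsX f then "x" else "o") := by
  simp only [pvIsV, pvIsM, pvIsX]
  by_cases h1 : f = "rv20"
  · subst h1; decide
  by_cases h2 : f = "rv20_sqrtT"
  · subst h2; decide
  by_cases h3 : f = "log_m_fwd"
  · subst h3; decide
  by_cases h4 : f = "abs_log_m_fwd"
  · subst h4; decide
  by_cases h5 : f = "x_m"
  · subst h5; decide
  by_cases h6 : f = "x_abs_m"
  · subst h6; decide
  have hk : pvGroupOf.keys = ["rv20", "rv20_sqrtT", "log_m_fwd", "abs_log_m_fwd", "x_m", "x_abs_m"] := by decide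
  have hc : pvGroupOf.contains f = false := by
    rw [PySem.Dict.contains_eq_decide_mem_keys, hk]
    simp [h1, h2, h3, h4, h5, h6]
  rw [PySem.Dict.getD_of_not_contains pvGroupOf "o" hc]
  simp [h1, h2, h3, h4, h5, h6]

lemma set_contains_eq_list_contains (l : List String) (f : String) :
    PySem.Set.contains (PySem.Set.ofList l) f = l.contains f := by
  by_cases h : f ∈ l <;> simp [PySem.Set.mem_ofList, h]

-- characterising B's single pass
lemma loop_char (base_features : List String) (xs : List String) (g : PvGroups) (b : Bool) :
    xs.foldl
      (fun (st : PvGroups × Bool) f =>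
        if !(PySem.Set.contains (PySem.Set.ofList base_features) f) then
          (pvGroupsAppend st.1 (pvGroupOf.getD f "o") f, true)
        else st)
      (g, b) =
    (⟨g.v ++ (xs.filter (fun f => !(base_features.contains f))).filter pvIsV,
      g.m ++ (xs.filter (fun f => !(base_features.contains f))).filter pvIsM,
      g.x ++ (xs.filter (fun f => !(base_features.contains f))).filter pvIsX,
      g.o ++ (xs.filter (fun f => !(base_features.contains f))).filter pvIsO⟩,
     b || !((xs.filter (fun f => !(base_features.contains f))).isEmpty)) := by
  induction xs generalizing g b with
  | nil => simp
  | cons f rest ih =>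
    rw [List.foldl_cons]
    by_cases hb : base_features.contains f = true
    · have hbm : f ∈ base_features := by simpa using hb
      rw [if_neg (by simp [hbm])]
      rw [ih]
      simp [hbm]
    · have hb' : base_features.contains f = false := by
        revert hb; cases base_features.contains f <;> simp
      have hbm : f ∉ base_features := by simpa using hb'
      rw [if_pos (by simp [hbm])]
      rw [ih, classify_eq]
      by_cases hv : pvIsV f = true
      · have hf : f = "rv20" ∨ f = "rv20_sqrtT" := by simpa [pvIsV] using hv
        have hm : pvIsM f = false := by rcases hf with rfl | rfl <;> rfl
        have hx : pvIsX f = false := by rcases hf with rfl | rfl <;> rfl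
        have ho : pvIsO f = false := by simp [pvIsO, hv]
        simp [pvGroupsAppend, hv, hm, hx, ho, hbm]
      · have hv' : pvIsV f = false := by simpa using hv
        by_cases hm : pvIsM f = true
        · have hf : f = "log_m_fwd" ∨ f = "abs_log_m_fwd" := by simpa [pvIsM] using hm
          have hx : pvIsX f = false := by rcases hf with rfl | rfl <;> rfl
          have ho : pvIsO f = false := by simp [pvIsO, hm]
          simp [pvGroupsAppend, hv', hm, hx, ho, hbm]
        · have hm' : pvIsM f = false := by simpa using hm
          by_cases hx : pvIsX f = true
          · have ho : pvIsO f = false := by simp [pvIsO, hx]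
            simp [pvGroupsAppend, hv', hm', hx, ho, hbm]
          · have hx' : pvIsX f = false := by simpa using hx
            have ho : pvIsO f = true := by simp [pvIsO, hv', hm', hx']
            simp [pvGroupsAppend, hv', hm', hx', ho, hbm]

lemma other_filter_eq (optional vol mon inter : List String)
    (hv : vol = optional.filter pvIsV) (hm : mon = optional.filter pvIsM)
    (hx : inter = optional.filter pvIsX) :
    optional.filter (fun f => !((PySem.Set.ofList (vol ++ mon ++ inter)).contains f)) =
      optional.filter pvIsO := by
  apply List.filter_congr
  intro f hf
  rw [set_contains_eq_list_contains]
  subst hv hm hx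
  simp only [pvIsO]
  by_cases hv' : pvIsV f <;> by_cases hm' : pvIsM f <;> by_cases hx' : pvIsX f <;>
    simp_all [List.mem_filter]

lemma all_empty_optional_nil (optional : List String)
    (hv : optional.filter pvIsV = []) (hm : optional.filter pvIsM = [])
    (hx : optional.filter pvIsX = []) (ho : optional.filter pvIsO = []) :
    optional = [] := by
  cases optional with
  | nil => rfl
  | cons f rest =>
    by_cases h1 : pvIsV f
    · simp [h1] at hv
    · by_cases h2 : pvIsM f
      · simp [h2] at hm
      · by_cases h3 : pvIsX f
        · simp [h3] at hx
        · have : pvIsO f := by simp [pvIsO, h1, h2, h3]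
          simp [this] at ho

lemma core_eq (V M X O : List String) :
    (if O = [] then List.foldl pvStepA [] [("v", V), ("m", M), ("x", X)]
     else List.foldl pvStepA [] [("v", V), ("m", M), ("x", X)] ++ ["o:" ++ PySem.Str.join "+" O]) =
    List.map (fun p => p ++ ":" ++ PySem.Str.join "+" (pvGroupsGet ⟨V, M, X, O⟩ p))
      (List.filter (fun p => decide (pvGroupsGet ⟨V, M, X, O⟩ p ≠ [])) ["v", "m", "x", "o"]) := by
  by_cases h1 : V = [] <;> by_cases h2 : M = [] <;> by_cases h3 : X = [] <;> by_cases h4 : O = [] <;>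
    simp [pvStepA, format_feat_token, pvGroupsGet, h1, h2, h3, h4]

-- ===== VERDICT (by name: the statement is the Claim_ definition above) =====
theorem build_feat_label_py_spec : Claim_equal_build_feat_label_py := by
  intro option_feats pm_feats base_features _
  unfold Spec_build_feat_label_py build_feat_label_py build_feat_label_py_alt
  simp only [show (fun f : String => f == "rv20" || f == "rv20_sqrtT") = pvIsV from rfl,
             show (fun f : String => f == "log_m_fwd" || f == "abs_log_m_fwd") = pvIsM from rfl,
             show (fun f : String => f == "x_m" || f == "x_abs_m") = pvIsX from rfl,
             loop_char]
  set optional := option_feats.filter (fun f => !(base_features.contains f)) with hopt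
  rw [other_filter_eq optional _ _ _ rfl rfl rfl]
  simp only [List.nil_append, Bool.false_or]
  rw [core_eq]
  by_cases hpm : pm_feats = []
  · by_cases hopt0 : optional = []
    · simp [hpm, hopt0]
    · have hie : optional.isEmpty = false := by
        cases hoc : optional with
        | nil => exact absurd hoc hopt0
        | cons a l => rfl
      simp [hpm, hopt0, hie]
      intro h1 h2 h3 h4
      simp only [pvGroupsGet] at h1 h2 h3 h4
      exact absurd (all_empty_optional_nil _ (by simpa using h1) (by simpa using h2)
        (by simpa using h3) (by simpa using h4)) hopt0
  · simp [hpm]
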